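-- pv_equiv track=rewrite | github.com/hyeonwowo/vsCode | 백준/단계별로풀어보기/파이썬/27.그래프와순회/2589_보물섬.py | solve
-- ===== SOURCE A (Python) =====
-- from collections import deque
--
-- def BFS(i, j, grid, n, m):
--     visited = [[False] * m for _ in range(n)]
--     distTo = [[0] * m for _ in range(n)]
--     queue = deque([(i, j)])
--
--     visited[i][j] = True
--     distTo[i][j] = 0
--
--     maxval = 0
--     directions = [(-1,0),(1,0),(0,-1),(0,1)]
--
--     while queue:
--         x, y = queue.popleft()
--         for dx, dy in directions:
--             rx, ry = x+dx, y+dy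
--             if 0 <= rx < n and 0 <= ry < m:
--                 if not visited[rx][ry] and grid[rx][ry] == 'L':
--                     visited[rx][ry] = True
--                     distTo[rx][ry] = distTo[x][y] + 1
--                     queue.append((rx, ry))
--                     maxval = max(maxval, distTo[rx][ry])
--     return maxval
--
-- def solve(grid, n, m):
--     maxval = 0
--     for i in range(n):
--         for j in range(m):
--             if grid[i][j] == 'L':
--                 cand = BFS(i, j, grid, n, m)
--                 maxval = max(maxval, cand)
--     return maxval
-- ===== SOURCE B (Python) =====
-- def cell_value(x, y, dist, grid, n, m):
--     if grid[x][y] != 'L':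
--         return dist[x][y]
--     best = dist[x][y]
--     for (rx, ry) in ((x - 1, y), (x + 1, y), (x, y - 1), (x, y + 1)):
--         if 0 <= rx < n and 0 <= ry < m and dist[rx][ry] is not None:
--             c = dist[rx][ry] + 1
--             if best is None or c < best:
--                 best = c
--     return best
--
-- def relax(dist, grid, n, m):
--     return [[cell_value(x, y, dist, grid, n, m) for y in range(m)] for x in range(n)]
--
-- def eccentricity(i, j, grid, n, m):
--     dist = [[None] * m for _ in range(n)]
--     dist[i][j] = 0
--     for _ in range(n * m + 1):
--         new = relax(dist, grid, n, m)
--         if new == dist: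
--             break
--         dist = new
--     return max(v for row in dist for v in row if v is not None)
--
-- def solve(grid, n, m):
--     best = 0
--     for i in range(n):
--         for j in range(m):
--             if grid[i][j] == 'L':
--                 best = max(best, eccentricity(i, j, grid, n, m))
--     return best
-- ===== Notes on version B (the rewrite author's own statement) =====
-- stated objective: alternative
-- what changed: Per-source queue BFS with a distTo matrix is replaced by Bellman-Ford-style relaxation: repeated synchronous full-grid sweeps (dist = min(dist, finite neighbour + 1)) until a fixpoint, then the maximum finite distance; no queue, frontier or traversal order is involved.
import Mathlib
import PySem

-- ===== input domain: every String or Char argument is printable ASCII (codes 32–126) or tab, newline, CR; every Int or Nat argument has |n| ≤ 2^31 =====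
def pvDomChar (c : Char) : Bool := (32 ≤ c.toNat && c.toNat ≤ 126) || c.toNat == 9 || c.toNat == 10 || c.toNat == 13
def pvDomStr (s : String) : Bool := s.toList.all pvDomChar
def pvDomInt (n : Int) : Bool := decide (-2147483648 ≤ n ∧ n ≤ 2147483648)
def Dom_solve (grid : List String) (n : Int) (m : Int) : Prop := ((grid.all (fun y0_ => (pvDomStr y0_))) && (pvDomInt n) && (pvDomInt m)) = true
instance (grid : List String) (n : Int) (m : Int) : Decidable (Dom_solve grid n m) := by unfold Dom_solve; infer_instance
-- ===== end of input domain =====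

-- B replaces A's per-source queue BFS by Bellman-Ford-style relaxation: full-grid sweeps
-- (dist = min(dist, neighbour+1)) to a fixpoint, then the maximum finite distance; same
-- return value wherever A returns ('alternative': no traversal structures at all).

-- shared 2-D indexing helpers (Python's grid[i][j] / M[i][j] = x on lists of rows; both ports
-- only index after the 0 <= i < n / 0 <= j < m bound check, where .toNat is exact)
def pvGet2 {α : Type} (v : List (List α)) (i j : Int) (d : α) : α :=
  (v.getD i.toNat []).getD j.toNat d

def pvSet2 {α : Type} (v : List (List α)) (i j : Int) (x : α) : List (List α) :=
  v.set i.toNat ((v.getD i.toNat []).set j.toNat x)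

def pvGridChar (grid : List String) (i j : Int) : Char :=
  ((grid.getD i.toNat "").toList).getD j.toNat ' '

def pvCountFalse (v : List (List Bool)) : Nat := (v.map (fun r => r.count false)).sum

-- lemmas port A's termination proof cites
theorem pvGet2_false_lt (v : List (List Bool)) (i j : Int)
    (h : pvGet2 v i j true = false) :
    i.toNat < v.length ∧ j.toNat < (v.getD i.toNat []).length := by
  unfold pvGet2 at h
  constructor
  · by_contra hn
    have hrow : v.getD i.toNat [] = [] := List.getD_eq_default _ _ (by omega)
    rw [hrow] at h
    simp [List.getD] at h
  · by_contra hn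
    have : (v.getD i.toNat []).getD j.toNat true = true := List.getD_eq_default _ _ (by omega)
    rw [this] at h
    simp at h

theorem pvCount_set_row (row : List Bool) (q : Nat) (hq : q < row.length)
    (hf : row[q] = false) :
    (row.set q true).count false + 1 = row.count false := by
  rw [List.set_eq_take_cons_drop _ hq]
  conv_rhs => rw [show row = row.take q ++ row.drop q from (List.take_append_drop q row).symm,
    List.drop_eq_getElem_cons hq, hf]
  simp [List.count_append]
  omega

theorem pvCf_set_row : ∀ (v : List (List Bool)) (k : Nat) (row : List Bool)
    (h : k < v.length),
    pvCountFalse (v.set k row) + (v[k]'h).count false = pvCountFalse v + row.count false := by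
  intro v
  induction v with
  | nil => intro k row h; simp at h
  | cons r t ih =>
    intro k row h
    cases k with
    | zero => simp [pvCountFalse]; omega
    | succ k' =>
      have := ih k' row (by simpa using Nat.lt_of_succ_lt_succ h)
      simp [pvCountFalse] at this ⊢
      omega

theorem pvCountFalse_set_true (v : List (List Bool)) (i j : Int)
    (h : pvGet2 v i j true = false) :
    pvCountFalse (pvSet2 v i j true) + 1 = pvCountFalse v := by
  obtain ⟨h1, h2⟩ := pvGet2_false_lt v i j h
  rw [List.getD_eq_getElem _ _ h1] at h2
  have hval : (v[i.toNat]'h1)[j.toNat]'h2 = false := by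
    unfold pvGet2 at h
    rw [List.getD_eq_getElem _ _ h1] at h
    rw [List.getD_eq_getElem _ _ h2] at h
    exact h
  unfold pvSet2
  rw [List.getD_eq_getElem _ _ h1]
  have hsum := pvCf_set_row v i.toNat ((v[i.toNat]'h1).set j.toNat true) h1
  have hrow := pvCount_set_row (v[i.toNat]'h1) j.toNat h2 hval
  omega

def pvMuA (st : List (List Bool) × List (List Int) × List (Int × Int) × Int) : Nat :=
  pvCountFalse st.1 + st.2.2.1.length

-- ===== PORT A =====
def dirsA : List (Int × Int) := [(-1, 0), (1, 0), (0, -1), (0, 1)]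

def stepA (grid : List String) (n m x y : Int)
    (st : List (List Bool) × List (List Int) × List (Int × Int) × Int) (dd : Int × Int) :
    List (List Bool) × List (List Int) × List (Int × Int) × Int :=
  if 0 ≤ x + dd.1 ∧ x + dd.1 < n ∧ 0 ≤ y + dd.2 ∧ y + dd.2 < m then
    if pvGet2 st.1 (x + dd.1) (y + dd.2) true = false ∧ pvGridChar grid (x + dd.1) (y + dd.2) = 'L' then
      (pvSet2 st.1 (x + dd.1) (y + dd.2) true,
       pvSet2 st.2.1 (x + dd.1) (y + dd.2) (pvGet2 st.2.1 x y 0 + 1),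
       st.2.2.1 ++ [(x + dd.1, y + dd.2)],
       max st.2.2.2
         (pvGet2 (pvSet2 st.2.1 (x + dd.1) (y + dd.2) (pvGet2 st.2.1 x y 0 + 1)) (x + dd.1) (y + dd.2) 0))
    else st
  else st

theorem pvMuA_step (grid : List String) (n m x y : Int) (st) (dd : Int × Int) :
    pvMuA (stepA grid n m x y st dd) ≤ pvMuA st := by
  unfold stepA
  split_ifs with h1 h2
  · have := pvCountFalse_set_true st.1 (x + dd.1) (y + dd.2) h2.1
    simp [pvMuA]
    omega
  · exact le_refl _
  · exact le_refl _

theorem pvMuA_foldl (grid : List String) (n m x y : Int) :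
    ∀ (l : List (Int × Int)) st, pvMuA (l.foldl (stepA grid n m x y) st) ≤ pvMuA st := by
  intro l
  induction l with
  | nil => intro st; exact le_refl _
  | cons dd t ih =>
    intro st
    exact le_trans (ih (stepA grid n m x y st dd)) (pvMuA_step grid n m x y st dd)

def bfsALoop (grid : List String) (n m : Int) (v : List (List Bool))
    (dist : List (List Int)) (queue : List (Int × Int)) (M : Int) : Int :=
  match queue with
  | [] => M
  | (x, y) :: rest =>
    let s := dirsA.foldl (stepA grid n m x y) (v, dist, rest, M)
    bfsALoop grid n m s.1 s.2.1 s.2.2.1 s.2.2.2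
termination_by pvCountFalse v + queue.length
decreasing_by
  have h := pvMuA_foldl grid n m x y dirsA (v, dist, rest, M)
  simp only [pvMuA] at h
  simp only [List.length_cons]
  omega

def BFS (i j : Int) (grid : List String) (n m : Int) : Int :=
  let visited := pvSet2 (List.replicate n.toNat (List.replicate m.toNat false)) i j true
  let distTo := pvSet2 (List.replicate n.toNat (List.replicate m.toNat (0 : Int))) i j 0
  bfsALoop grid n m visited distTo [(i, j)] 0

def solve (grid : List String) (n : Int) (m : Int) : Int :=
  (List.range n.toNat).foldl (fun acc (i : Nat) =>
    (List.range m.toNat).foldl (fun acc2 (j : Nat) =>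
      if pvGridChar grid (i : Int) (j : Int) = 'L' then
        max acc2 (BFS (i : Int) (j : Int) grid n m)
      else acc2) acc) 0

-- ===== PORT B =====
def nbrs (x y : Int) : List (Int × Int) := [(x - 1, y), (x + 1, y), (x, y - 1), (x, y + 1)]

-- the body of Source B's inner neighbour loop in cell_value
def relaxStep (dist : List (List (Option Int))) (n m : Int) (best : Option Int) (c : Int × Int) :
    Option Int :=
  if (0 ≤ c.1 ∧ c.1 < n) ∧ (0 ≤ c.2 ∧ c.2 < m) ∧ pvGet2 dist c.1 c.2 (none : Option Int) ≠ none then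
    match pvGet2 dist c.1 c.2 (none : Option Int) with
    | none => best
    | some d =>
      match best with
      | none => some (d + 1)
      | some b => if d + 1 < b then some (d + 1) else some b
  else best

def cellValue (dist : List (List (Option Int))) (grid : List String) (n m x y : Int) : Option Int :=
  if pvGridChar grid x y ≠ 'L' then pvGet2 dist x y (none : Option Int)
  else (nbrs x y).foldl (relaxStep dist n m) (pvGet2 dist x y (none : Option Int))

-- one full synchronous sweep over the grid (Source B's relax)
def relaxGrid (dist : List (List (Option Int))) (grid : List String) (n m : Int) :
    List (List (Option Int)) :=
  (List.range n.toNat).map (fun (x : Nat) =>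
    (List.range m.toNat).map (fun (y : Nat) => cellValue dist grid n m (x : Int) (y : Int)))

-- Source B's bounded sweep loop with the early fixpoint exit
def relaxLoop (grid : List String) (n m : Int) : List (List (Option Int)) → Nat →
    List (List (Option Int))
  | dist, 0 => dist
  | dist, fuel + 1 =>
    let new := relaxGrid dist grid n m
    if new = dist then dist else relaxLoop grid n m new fuel

-- Python's max over the finite entries in row-major order; the [] branch is unreachable from
-- solve_alt (the source cell keeps a finite entry) — Python's max would raise there
def maxFinite (dist : List (List (Option Int))) : Int :=
  match dist.flatten.filterMap id with
  | [] => 0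
  | v :: vs => vs.foldl max v

def eccentricity (i j : Int) (grid : List String) (n m : Int) : Int :=
  let dist0 := pvSet2 (List.replicate n.toNat (List.replicate m.toNat (none : Option Int))) i j (some 0)
  maxFinite (relaxLoop grid n m dist0 (n.toNat * m.toNat + 1))

def solve_alt (grid : List String) (n : Int) (m : Int) : Int :=
  (List.range n.toNat).foldl (fun best (i : Nat) =>
    (List.range m.toNat).foldl (fun best2 (j : Nat) =>
      if pvGridChar grid (i : Int) (j : Int) = 'L' then
        max best2 (eccentricity (i : Int) (j : Int) grid n m)
      else best2) best) 0

-- ===== PRECONDITION & SPEC =====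
-- Pre_solve excludes exactly the inputs where Python A raises IndexError: when n > 0 and m > 0 the
-- outer loops index grid[i][j] for every i < n, j < m, so the grid must have at least n rows and
-- its first n rows must each have at least m characters.  (For n ≤ 0 or m ≤ 0 nothing is indexed.)
def Pre_solve (grid : List String) (n : Int) (m : Int) : Prop :=
  0 < n → 0 < m → (n ≤ (grid.length : Int) ∧ ∀ row ∈ grid.take n.toNat, m ≤ (row.toList.length : Int))
instance (grid : List String) (n : Int) (m : Int) : Decidable (Pre_solve grid n m) := by
  unfold Pre_solve; infer_instance

def pvWitness_solve : List String × Int × Int := (["LLW", "WLL"], 2, 3)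

def Spec_solve (grid : List String) (n : Int) (m : Int) (out : Int) : Prop := out = solve_alt grid n m
instance (grid : List String) (n : Int) (m : Int) (out : Int) : Decidable (Spec_solve grid n m out) := by
  unfold Spec_solve; infer_instance

-- ===== CLAIM (what is proved, stated in full; the proofs are below) =====
def Claim_equal_solve : Prop := ∀ (grid : List String) (n : Int) (m : Int), Dom_solve grid n m → Pre_solve grid n m → Spec_solve grid n m (solve grid n m)

-- ===== LEMMAS AND PROOFS =====


-- ===== proof-side reference: the level-order frontier loop (used only by the proofs) =====
def pvMuB (st : List (List Bool) × List (Int × Int)) : Nat :=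
  pvCountFalse st.1 + st.2.length

def stepB (grid : List String) (n m : Int)
    (st : List (List Bool) × List (Int × Int)) (c : Int × Int) :
    List (List Bool) × List (Int × Int) :=
  if (0 ≤ c.1 ∧ c.1 < n) ∧ (0 ≤ c.2 ∧ c.2 < m) ∧
      pvGet2 st.1 c.1 c.2 true = false ∧ pvGridChar grid c.1 c.2 = 'L' then
    (pvSet2 st.1 c.1 c.2 true, st.2 ++ [c])
  else st

def procB (grid : List String) (n m : Int)
    (st : List (List Bool) × List (Int × Int)) (cell : Int × Int) :
    List (List Bool) × List (Int × Int) :=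
  (nbrs cell.1 cell.2).foldl (stepB grid n m) st

theorem pvMuB_step (grid : List String) (n m : Int) (st) (c : Int × Int) :
    pvMuB (stepB grid n m st c) ≤ pvMuB st := by
  unfold stepB
  split_ifs with h
  · have := pvCountFalse_set_true st.1 c.1 c.2 h.2.2.1
    simp [pvMuB]
    omega
  · exact le_refl _

theorem pvMuB_foldl (grid : List String) (n m : Int) :
    ∀ (l : List (Int × Int)) st, pvMuB (l.foldl (stepB grid n m) st) ≤ pvMuB st := by
  intro l
  induction l with
  | nil => intro st; exact le_refl _
  | cons c t ih =>
    intro st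
    exact le_trans (ih (stepB grid n m st c)) (pvMuB_step grid n m st c)

theorem pvMuB_foldl_proc (grid : List String) (n m : Int) :
    ∀ (l : List (Int × Int)) st, pvMuB (l.foldl (procB grid n m) st) ≤ pvMuB st := by
  intro l
  induction l with
  | nil => intro st; exact le_refl _
  | cons c t ih =>
    intro st
    exact le_trans (ih (procB grid n m st c)) (pvMuB_foldl grid n m _ st)

def bfsBLoop (grid : List String) (n m : Int) (v : List (List Bool))
    (frontier : List (Int × Int)) (depth : Int) : Int :=
  if frontier = [] then depth
  else
    let s := frontier.foldl (procB grid n m) (v, ([] : List (Int × Int)))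
    bfsBLoop grid n m s.1 s.2 (if s.2 = [] then depth else depth + 1)
termination_by 2 * pvCountFalse v + frontier.length
decreasing_by
  rename_i hne
  have h := pvMuB_foldl_proc grid n m frontier (v, ([] : List (Int × Int)))
  simp only [pvMuB, List.length_nil] at h
  have hor : (frontier.foldl (procB grid n m) (v, ([] : List (Int × Int)))).2.length = 0 ∨
      1 ≤ (frontier.foldl (procB grid n m) (v, ([] : List (Int × Int)))).2.length := by omega
  have hfl : 1 ≤ frontier.length := by
    cases frontier with
    | nil => exact absurd rfl hne
    | cons a b => simp
  simp only [List.foldl_attach]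
  omega

def refEcc (i j : Int) (grid : List String) (n m : Int) : Int :=
  let visited := pvSet2 (List.replicate n.toNat (List.replicate m.toNat false)) i j true
  bfsBLoop grid n m visited [(i, j)] 0

-- proof-side abbreviations
def pvVis (v : List (List Bool)) (c : Int × Int) : Bool := pvGet2 v c.1 c.2 true
def pvDg (dist : List (List Int)) (c : Int × Int) : Int := pvGet2 dist c.1 c.2 0
-- "the visited grid and the distance grid have the same shape"
def pvShp (v : List (List Bool)) (dist : List (List Int)) : Prop :=
  v.map List.length = dist.map List.length

theorem pvGet2_set2_ne {α : Type} (v : List (List α)) (i j a b : Int) (x : α) (d : α)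
    (h : ¬(i.toNat = a.toNat ∧ j.toNat = b.toNat)) :
    pvGet2 (pvSet2 v i j x) a b d = pvGet2 v a b d := by
  unfold pvGet2 pvSet2
  by_cases hi : i.toNat = a.toNat
  · have hj : j.toNat ≠ b.toNat := fun hj => h ⟨hi, hj⟩
    rw [hi]
    by_cases hlt : a.toNat < v.length
    · have h1 : (v.set a.toNat ((v.getD a.toNat []).set j.toNat x)).getD a.toNat []
          = (v.getD a.toNat []).set j.toNat x := by
        rw [List.getD_eq_getElem?_getD, List.getElem?_set_self hlt]; rfl
      have h2 : ((v.getD a.toNat []).set j.toNat x).getD b.toNat d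
          = (v.getD a.toNat []).getD b.toNat d := by
        rw [List.getD_eq_getElem?_getD, List.getElem?_set_ne hj, ← List.getD_eq_getElem?_getD]
      rw [h1, h2]
    · rw [List.set_eq_of_length_le (by omega)]
  · have h1 : (v.set i.toNat ((v.getD i.toNat []).set j.toNat x)).getD a.toNat []
        = v.getD a.toNat [] := by
      rw [List.getD_eq_getElem?_getD, List.getElem?_set_ne hi, ← List.getD_eq_getElem?_getD]
    rw [h1]

theorem pvGet2_set2_self_true (v : List (List Bool)) (i j : Int) :
    pvGet2 (pvSet2 v i j true) i j true = true := by
  unfold pvGet2 pvSet2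
  by_cases h1 : i.toNat < v.length
  · have hrow : (v.set i.toNat ((v.getD i.toNat []).set j.toNat true)).getD i.toNat []
        = (v.getD i.toNat []).set j.toNat true := by
      rw [List.getD_eq_getElem?_getD, List.getElem?_set_self h1]; rfl
    rw [hrow]
    by_cases h2 : j.toNat < (v.getD i.toNat []).length
    · rw [List.getD_eq_getElem _ _ (by simpa using h2), List.getElem_set_self]
    · rw [List.getD_eq_default _ _ (by rw [List.length_set]; omega)]
  · rw [List.set_eq_of_length_le (by omega)]
    have hrow : v.getD i.toNat [] = [] := List.getD_eq_default _ _ (by omega)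
    rw [hrow]
    rfl

theorem pvGet2_set2_self_in {α : Type} (v : List (List α)) (i j : Int) (x d : α)
    (h1 : i.toNat < v.length) (h2 : j.toNat < (v.getD i.toNat []).length) :
    pvGet2 (pvSet2 v i j x) i j d = x := by
  unfold pvGet2 pvSet2
  have hrow : (v.set i.toNat ((v.getD i.toNat []).set j.toNat x)).getD i.toNat []
      = (v.getD i.toNat []).set j.toNat x := by
    rw [List.getD_eq_getElem?_getD, List.getElem?_set_self h1]; rfl
  rw [hrow, List.getD_eq_getElem _ _ (by simpa using h2), List.getElem_set_self]

theorem pvShp_len (v : List (List Bool)) (dist : List (List Int)) (h : pvShp v dist) :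
    v.length = dist.length := by
  have := congrArg List.length h
  simpa using this

theorem pvShp_rowlen (v : List (List Bool)) (dist : List (List Int)) (h : pvShp v dist)
    (k : Nat) : (v.getD k []).length = (dist.getD k []).length := by
  have hlen := pvShp_len v dist h
  by_cases hk : k < v.length
  · have := congrArg (fun l => l[k]?) h
    simp only [List.getElem?_map] at this
    rw [List.getElem?_eq_getElem hk, List.getElem?_eq_getElem (by omega : k < dist.length)] at this
    simp only [Option.map_some, Option.some.injEq] at this
    rw [List.getD_eq_getElem _ _ hk, List.getD_eq_getElem _ _ (by omega : k < dist.length)]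
    exact this
  · rw [List.getD_eq_default _ _ (by omega), List.getD_eq_default _ _ (by omega)]
    rfl

theorem pvShp_set (v : List (List Bool)) (dist : List (List Int)) (i j : Int)
    (x : Bool) (z : Int) (h : pvShp v dist) :
    pvShp (pvSet2 v i j x) (pvSet2 dist i j z) := by
  unfold pvShp pvSet2
  rw [List.map_set, List.map_set]
  unfold pvShp at h
  rw [h]
  congr 1
  rw [List.length_set, List.length_set]
  exact pvShp_rowlen v dist h i.toNat

-- positions (as Nat pairs) of a visited and an unvisited cell differ
theorem pvPos_ne (v : List (List Bool)) (w r : Int × Int)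
    (hw : pvVis v w = true) (hr : pvVis v r = false) :
    ¬(r.1.toNat = w.1.toNat ∧ r.2.toNat = w.2.toNat) := by
  rintro ⟨h1, h2⟩
  unfold pvVis pvGet2 at hw hr
  rw [h1, h2] at hr
  rw [hr] at hw
  exact Bool.false_ne_true hw

-- unfolding equations for the two loops
theorem bfsALoop_nil (grid : List String) (n m : Int) (v dist) (M : Int) :
    bfsALoop grid n m v dist [] M = M := by
  rw [bfsALoop]

theorem bfsALoop_cons (grid : List String) (n m : Int) (v dist) (x y : Int)
    (rest : List (Int × Int)) (M : Int) :
    bfsALoop grid n m v dist ((x, y) :: rest) M =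
      (fun s => bfsALoop grid n m s.1 s.2.1 s.2.2.1 s.2.2.2)
        (dirsA.foldl (stepA grid n m x y) (v, dist, rest, M)) := by
  rw [bfsALoop]

theorem bfsBLoop_nil (grid : List String) (n m : Int) (v) (depth : Int) :
    bfsBLoop grid n m v [] depth = depth := by
  rw [bfsBLoop.eq_def]
  simp

theorem bfsBLoop_cons (grid : List String) (n m : Int) (v) (c : Int × Int)
    (cs : List (Int × Int)) (depth : Int) :
    bfsBLoop grid n m v (c :: cs) depth =
      (fun s => bfsBLoop grid n m s.1 s.2 (if s.2 = [] then depth else depth + 1))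
        ((c :: cs).foldl (procB grid n m) (v, ([] : List (Int × Int)))) := by
  rw [bfsBLoop.eq_def]
  simp

-- A's dir-fold only appends to the tail of whatever queue it is given
theorem stepA_queue_append (grid : List String) (n m x y : Int) (r : List (Int × Int))
    (v dist p M) (dd : Int × Int) :
    stepA grid n m x y (v, dist, r ++ p, M) dd =
      (fun t => (t.1, t.2.1, r ++ t.2.2.1, t.2.2.2)) (stepA grid n m x y (v, dist, p, M) dd) := by
  unfold stepA
  split_ifs with h1 h2 <;> simp [List.append_assoc]

theorem foldA_queue_append (grid : List String) (n m x y : Int) :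
    ∀ (l : List (Int × Int)) (r : List (Int × Int)) v dist p M,
    l.foldl (stepA grid n m x y) (v, dist, r ++ p, M) =
      (fun t => (t.1, t.2.1, r ++ t.2.2.1, t.2.2.2)) (l.foldl (stepA grid n m x y) (v, dist, p, M)) := by
  intro l
  induction l with
  | nil => intro r v dist p M; rfl
  | cons dd t ih =>
    intro r v dist p M
    simp only [List.foldl_cons]
    rw [stepA_queue_append]
    rcases hstep : stepA grid n m x y (v, dist, p, M) dd with ⟨v1, dist1, p1, M1⟩
    exact ih r v1 dist1 p1 M1

-- running A's loop through one block of the queue = folding node-processing over the block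
def procA (grid : List String) (n m : Int)
    (st : List (List Bool) × List (List Int) × List (Int × Int) × Int) (cell : Int × Int) :
    List (List Bool) × List (List Int) × List (Int × Int) × Int :=
  dirsA.foldl (stepA grid n m cell.1 cell.2) st

theorem bfsALoop_level (grid : List String) (n m : Int) :
    ∀ (rest : List (Int × Int)) v dist (p : List (Int × Int)) (M : Int),
    bfsALoop grid n m v dist (rest ++ p) M =
      (fun s => bfsALoop grid n m s.1 s.2.1 s.2.2.1 s.2.2.2)
        (rest.foldl (procA grid n m) (v, dist, p, M)) := by
  intro rest
  induction rest with
  | nil => intro v dist p M; rfl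
  | cons c t ih =>
    intro v dist p M
    rcases c with ⟨x, y⟩
    rw [List.cons_append, bfsALoop_cons, foldA_queue_append]
    rcases hstep : dirsA.foldl (stepA grid n m x y) (v, dist, p, M) with ⟨v1, dist1, p1, M1⟩
    simp only
    rw [ih v1 dist1 p1 M1]
    simp only [List.foldl_cons]
    unfold procA
    rw [hstep]

theorem nbrs_eq_map (x y : Int) :
    nbrs x y = dirsA.map (fun dd => (x + dd.1, y + dd.2)) := by
  simp [nbrs, dirsA, Prod.ext_iff]
  omega

-- the core simulation: processing one node's four neighbours
theorem nodeSim (grid : List String) (n m : Int) (d : Int) :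
    ∀ (ds : List (Int × Int)) (v : List (List Bool)) (dist : List (List Int))
      (p : List (Int × Int)) (M : Int) (x y : Int),
    pvShp v dist →
    pvVis v (x, y) = true →
    pvDg dist (x, y) = d →
    M = (if p = [] then d else d + 1) →
    (∀ w ∈ p, pvVis v w = true ∧ pvDg dist w = d + 1) →
    (let sA := ds.foldl (stepA grid n m x y) (v, dist, p, M)
     let sB := ds.foldl (fun st dd => stepB grid n m st (x + dd.1, y + dd.2)) (v, p)
     sA.1 = sB.1 ∧ sA.2.2.1 = sB.2 ∧ pvShp sA.1 sA.2.1 ∧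
     sA.2.2.2 = (if sA.2.2.1 = [] then d else d + 1) ∧
     (∀ w, pvVis v w = true → pvVis sA.1 w = true ∧ pvDg sA.2.1 w = pvDg dist w) ∧
     (∀ w ∈ sA.2.2.1, pvVis sA.1 w = true ∧ pvDg sA.2.1 w = d + 1)) := by
  intro ds
  induction ds with
  | nil =>
    intro v dist p M x y hshp hvis hdg hM hp
    exact ⟨rfl, rfl, hshp, hM, fun w hw => ⟨hw, rfl⟩, fun w hw => hp w hw⟩
  | cons dd t ih =>
    intro v dist p M x y hshp hvis hdg hM hp
    simp only [List.foldl_cons]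
    by_cases hb : 0 ≤ x + dd.1 ∧ x + dd.1 < n ∧ 0 ≤ y + dd.2 ∧ y + dd.2 < m
    · by_cases hg : pvGet2 v (x + dd.1) (y + dd.2) true = false ∧
          pvGridChar grid (x + dd.1) (y + dd.2) = 'L'
      · -- the neighbour is newly discovered
        have hdx : pvGet2 dist x y 0 = d := hdg
        have hin := pvGet2_false_lt v (x + dd.1) (y + dd.2) hg.1
        have hlen := pvShp_len v dist hshp
        have hrowlen := pvShp_rowlen v dist hshp (x + dd.1).toNat
        have hstepA : stepA grid n m x y (v, dist, p, M) dd =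
            (pvSet2 v (x + dd.1) (y + dd.2) true,
             pvSet2 dist (x + dd.1) (y + dd.2) (d + 1),
             p ++ [(x + dd.1, y + dd.2)],
             d + 1) := by
          unfold stepA
          rw [if_pos hb, if_pos hg, hdx]
          have hwv : pvGet2 (pvSet2 dist (x + dd.1) (y + dd.2) (d + 1))
              (x + dd.1) (y + dd.2) 0 = d + 1 :=
            pvGet2_set2_self_in dist _ _ _ _ (by omega) (by omega)
          have hmax : max M (d + 1) = d + 1 :=
            max_eq_right (by rw [hM]; split_ifs <;> omega)
          rw [hwv, hmax]
        have hstepB : stepB grid n m (v, p) (x + dd.1, y + dd.2) =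
            (pvSet2 v (x + dd.1) (y + dd.2) true, p ++ [(x + dd.1, y + dd.2)]) := by
          unfold stepB
          rw [if_pos ⟨⟨hb.1, hb.2.1⟩, ⟨hb.2.2.1, hb.2.2.2⟩, hg.1, hg.2⟩]
        simp only [hstepA, hstepB]
        -- invariants for the updated state
        have hvisr : pvVis v (x + dd.1, y + dd.2) = false := hg.1
        have hnexy := pvPos_ne v (x, y) (x + dd.1, y + dd.2) hvis hvisr
        have hshp2 := pvShp_set v dist (x + dd.1) (y + dd.2) true (d + 1) hshp
        have hvis2 : pvVis (pvSet2 v (x + dd.1) (y + dd.2) true) (x, y) = true := by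
          unfold pvVis
          rw [pvGet2_set2_ne v _ _ _ _ _ _ hnexy]
          exact hvis
        have hdg2 : pvDg (pvSet2 dist (x + dd.1) (y + dd.2) (d + 1)) (x, y) = d := by
          unfold pvDg
          rw [pvGet2_set2_ne dist _ _ _ _ _ _ hnexy]
          exact hdg
        have hp2 : ∀ w ∈ p ++ [(x + dd.1, y + dd.2)],
            pvVis (pvSet2 v (x + dd.1) (y + dd.2) true) w = true ∧
            pvDg (pvSet2 dist (x + dd.1) (y + dd.2) (d + 1)) w = d + 1 := by
          intro w hw
          rcases List.mem_append.mp hw with hw | hw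
          · obtain ⟨hwv, hwd⟩ := hp w hw
            have hne := pvPos_ne v w (x + dd.1, y + dd.2) hwv hvisr
            constructor
            · unfold pvVis; rw [pvGet2_set2_ne v _ _ _ _ _ _ hne]; exact hwv
            · unfold pvDg; rw [pvGet2_set2_ne dist _ _ _ _ _ _ hne]; exact hwd
          · rw [List.mem_singleton.mp hw]
            constructor
            · exact pvGet2_set2_self_true v _ _
            · exact pvGet2_set2_self_in dist _ _ _ _ (by omega) (by omega)
        have key := ih (pvSet2 v (x + dd.1) (y + dd.2) true)
          (pvSet2 dist (x + dd.1) (y + dd.2) (d + 1))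
          (p ++ [(x + dd.1, y + dd.2)]) (d + 1) x y hshp2 hvis2 hdg2 (by simp) hp2
        obtain ⟨e1, e2, e3, e4, e5, e6⟩ := key
        refine ⟨e1, e2, e3, e4, ?_, e6⟩
        intro w hw
        have hne := pvPos_ne v w (x + dd.1, y + dd.2) hw hvisr
        have h1 : pvVis (pvSet2 v (x + dd.1) (y + dd.2) true) w = true := by
          unfold pvVis; rw [pvGet2_set2_ne v _ _ _ _ _ _ hne]; exact hw
        obtain ⟨p1, p2⟩ := e5 w h1
        refine ⟨p1, ?_⟩
        rw [p2]
        unfold pvDg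
        rw [pvGet2_set2_ne dist _ _ _ _ _ _ hne]
      · -- bounds ok but already visited / not land: both steps are the identity
        have hstepA : stepA grid n m x y (v, dist, p, M) dd = (v, dist, p, M) := by
          unfold stepA; rw [if_pos hb, if_neg hg]
        have hstepB : stepB grid n m (v, p) (x + dd.1, y + dd.2) = (v, p) := by
          unfold stepB; rw [if_neg (by tauto)]
        simp only [hstepA, hstepB]
        exact ih v dist p M x y hshp hvis hdg hM hp
    · -- out of bounds: both steps are the identity
      have hstepA : stepA grid n m x y (v, dist, p, M) dd = (v, dist, p, M) := by
        unfold stepA; rw [if_neg hb]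
      have hstepB : stepB grid n m (v, p) (x + dd.1, y + dd.2) = (v, p) := by
        unfold stepB; rw [if_neg (by tauto)]
      simp only [hstepA, hstepB]
      exact ih v dist p M x y hshp hvis hdg hM hp

-- processing a whole level
theorem levelSim (grid : List String) (n m : Int) (d : Int) :
    ∀ (rest : List (Int × Int)) (v : List (List Bool)) (dist : List (List Int))
      (p : List (Int × Int)) (M : Int),
    pvShp v dist →
    M = (if p = [] then d else d + 1) →
    (∀ c ∈ rest, pvVis v c = true ∧ pvDg dist c = d) →
    (∀ w ∈ p, pvVis v w = true ∧ pvDg dist w = d + 1) →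
    (let sA := rest.foldl (procA grid n m) (v, dist, p, M)
     let sB := rest.foldl (procB grid n m) (v, p)
     sA.1 = sB.1 ∧ sA.2.2.1 = sB.2 ∧ pvShp sA.1 sA.2.1 ∧
     sA.2.2.2 = (if sA.2.2.1 = [] then d else d + 1) ∧
     (∀ w ∈ sA.2.2.1, pvVis sA.1 w = true ∧ pvDg sA.2.1 w = d + 1)) := by
  intro rest
  induction rest with
  | nil =>
    intro v dist p M hshp hM _ hp
    exact ⟨rfl, rfl, hshp, hM, fun w hw => hp w hw⟩
  | cons c t ih =>
    intro v dist p M hshp hM hrest hp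
    simp only [List.foldl_cons]
    have hc := hrest c (List.mem_cons_self)
    have key := nodeSim grid n m d dirsA v dist p M c.1 c.2 hshp hc.1 hc.2 hM hp
    have hprocB : procB grid n m (v, p) c =
        dirsA.foldl (fun st dd => stepB grid n m st (c.1 + dd.1, c.2 + dd.2)) (v, p) := by
      unfold procB
      rw [nbrs_eq_map, List.foldl_map]
    obtain ⟨e1, e2, e3, e4, e5, e6⟩ := key
    rcases hA : dirsA.foldl (stepA grid n m c.1 c.2) (v, dist, p, M) with ⟨v1, dist1, p1, M1⟩
    rw [hA] at e1 e2 e3 e4 e5 e6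
    have hB : procB grid n m (v, p) c = (v1, p1) := by
      rw [hprocB, Prod.ext_iff]
      exact ⟨e1.symm, e2.symm⟩
    have hAp : procA grid n m (v, dist, p, M) c = (v1, dist1, p1, M1) := by
      unfold procA; exact hA
    simp only [hAp, hB]
    have hrest2 : ∀ c' ∈ t, pvVis v1 c' = true ∧ pvDg dist1 c' = d := by
      intro c' hc'
      obtain ⟨h1, h2⟩ := hrest c' (List.mem_cons_of_mem _ hc')
      obtain ⟨q1, q2⟩ := e5 c' h1
      exact ⟨q1, by rw [q2, h2]⟩
    exact ih v1 dist1 p1 M1 e3 e4 hrest2 e6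

-- the two loops agree level by level
theorem mainSim (grid : List String) (n m : Int) :
    ∀ (N : Nat) (v : List (List Bool)) (dist : List (List Int))
      (frontier : List (Int × Int)) (d : Int),
    2 * pvCountFalse v + frontier.length ≤ N →
    pvShp v dist →
    (∀ c ∈ frontier, pvVis v c = true ∧ pvDg dist c = d) →
    bfsALoop grid n m v dist frontier d = bfsBLoop grid n m v frontier d := by
  intro N
  induction N with
  | zero =>
    intro v dist frontier d hN _ _
    have : frontier = [] := by
      cases frontier with
      | nil => rfl
      | cons a b => simp at hN
    subst this
    rw [bfsALoop_nil, bfsBLoop_nil]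
  | succ N ih =>
    intro v dist frontier d hN hshp hfr
    cases frontier with
    | nil => rw [bfsALoop_nil, bfsBLoop_nil]
    | cons c cs =>
      have hmu := pvMuB_foldl_proc grid n m (c :: cs) (v, ([] : List (Int × Int)))
      have hlvl := levelSim grid n m d (c :: cs) v dist [] d hshp (by simp) hfr (by simp)
      obtain ⟨e1, e2, e3, e4, e5⟩ := hlvl
      have hsplit : bfsALoop grid n m v dist (c :: cs) d =
          (fun s => bfsALoop grid n m s.1 s.2.1 s.2.2.1 s.2.2.2)
            ((c :: cs).foldl (procA grid n m) (v, dist, [], d)) := by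
        conv_lhs => rw [show (c :: cs) = (c :: cs) ++ ([] : List (Int × Int)) by simp]
        rw [bfsALoop_level]
      rw [hsplit, bfsBLoop_cons]
      rcases hA : (c :: cs).foldl (procA grid n m) (v, dist, [], d) with ⟨v1, dist1, p1, M1⟩
      rcases hB : (c :: cs).foldl (procB grid n m) (v, ([] : List (Int × Int))) with ⟨v2, p2⟩
      rw [hA] at e1 e2 e3 e4 e5
      rw [hB] at e1 e2
      rw [hB] at hmu
      simp only at e1 e2 e3 e4 e5 ⊢
      subst e1 e2
      cases hp1 : p1 with
      | nil =>
        subst hp1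
        rw [if_pos rfl] at e4
        subst e4
        rw [bfsALoop_nil, if_pos rfl, bfsBLoop_nil]
      | cons a b =>
        subst hp1
        rw [if_neg (by simp)] at e4
        subst e4
        rw [if_neg (by simp)]
        apply ih v1 dist1 (a :: b) (d + 1) ?_ e3 e5
        simp only [pvMuB, List.length_nil, List.length_cons] at hmu hN ⊢
        omega

theorem pvAllConst {α : Type} (v : List (List α)) (d : α)
    (h : ∀ r ∈ v, ∀ a ∈ r, a = d) (x y : Int) :
    pvGet2 v x y d = d := by
  unfold pvGet2
  by_cases h1 : x.toNat < v.length
  · rw [List.getD_eq_getElem _ _ h1]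
    have hrow := List.getElem_mem h1
    by_cases h2 : y.toNat < (v[x.toNat]'h1).length
    · rw [List.getD_eq_getElem _ _ h2]
      exact h _ hrow _ (List.getElem_mem h2)
    · rw [List.getD_eq_default _ _ (by omega)]
  · have hrow : v.getD x.toNat [] = [] := List.getD_eq_default _ _ (by omega)
    rw [hrow]
    rfl

theorem pvDgInit (a b : Nat) (i j x y : Int) :
    pvGet2 (pvSet2 (List.replicate a (List.replicate b (0 : Int))) i j 0) x y 0 = 0 := by
  apply pvAllConst
  intro r hr q hq
  unfold pvSet2 at hr
  rcases List.mem_or_eq_of_mem_set hr with hr | hr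
  · rw [List.eq_of_mem_replicate hr] at hq
    exact List.eq_of_mem_replicate hq
  · subst hr
    rcases List.mem_or_eq_of_mem_set hq with hq | hq
    · by_cases hlt : i.toNat < a
      · rw [List.getD_eq_getElem _ _ (by simpa using hlt)] at hq
        have : (List.replicate a (List.replicate b (0 : Int)))[i.toNat]'(by simpa using hlt)
            = List.replicate b (0 : Int) := List.getElem_replicate ..
        rw [this] at hq
        exact List.eq_of_mem_replicate hq
      · rw [List.getD_eq_default _ _ (by simpa using hlt)] at hq
        simp at hq
    · exact hq

theorem BFS_eq_ref (i j : Int) (grid : List String) (n m : Int) :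
    BFS i j grid n m = refEcc i j grid n m := by
  unfold BFS refEcc
  simp only
  apply mainSim grid n m
      (2 * pvCountFalse (pvSet2 (List.replicate n.toNat (List.replicate m.toNat false)) i j true) + 1)
  · simp
  · apply pvShp_set
    unfold pvShp
    simp [List.map_replicate]
  · intro c hc
    rw [List.mem_singleton.mp hc]
    exact ⟨pvGet2_set2_self_true _ i j, pvDgInit n.toNat m.toNat i j i j⟩


-- ===== bridge from the reference level loop to B's relaxation sweeps =====
def pvD (D : List (List (Option Int))) (c : Int × Int) : Option Int := pvGet2 D c.1 c.2 none
def pvIB (n m : Int) (c : Int × Int) : Prop := 0 ≤ c.1 ∧ c.1 < n ∧ 0 ≤ c.2 ∧ c.2 < m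
def pvShape {α : Type} (n m : Int) (M : List (List α)) : Prop :=
  M.length = n.toNat ∧ ∀ r ∈ M, r.length = m.toNat
def pvLand (grid : List String) (c : Int × Int) : Prop := pvGridChar grid c.1 c.2 = 'L'

-- the loop invariant tying the reference level loop's state (v, f, depth) to the sweep state D
def pvInv (grid : List String) (n m : Int) (v : List (List Bool)) (f : List (Int × Int))
    (depth : Int) (D : List (List (Option Int))) : Prop :=
  pvShape n m v ∧ pvShape n m D ∧
  (∀ c, pvIB n m c → (pvVis v c = true ↔ pvD D c ≠ none)) ∧
  (∀ c ∈ f, pvIB n m c ∧ pvD D c = some depth) ∧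
  (∀ c, pvIB n m c → ∀ k, pvD D c = some k → k ≤ depth) ∧
  (∃ c, pvIB n m c ∧ pvD D c = some depth) ∧
  (∀ c c', pvIB n m c → pvIB n m c' → c' ∈ nbrs c.1 c.2 →
     ∀ k k', pvD D c = some k → pvD D c' = some k' → k' ≤ k + 1) ∧
  (∀ c, pvIB n m c → pvVis v c = true → c ∉ f →
     ∀ c', pvIB n m c' → c' ∈ nbrs c.1 c.2 → pvLand grid c' → pvVis v c' = true)

theorem nbrs_symm (a b : Int × Int) (h : a ∈ nbrs b.1 b.2) : b ∈ nbrs a.1 a.2 := by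
  rcases a with ⟨a1, a2⟩
  rcases b with ⟨b1, b2⟩
  simp only [nbrs, List.mem_cons, Prod.mk.injEq, List.not_mem_nil, or_false] at h ⊢
  omega

theorem nbrs_ne (a b : Int × Int) (h : a ∈ nbrs b.1 b.2) : a ≠ b := by
  rcases a with ⟨a1, a2⟩
  rcases b with ⟨b1, b2⟩
  simp only [nbrs, List.mem_cons, Prod.mk.injEq, List.not_mem_nil, or_false,
    ne_eq, not_and] at h ⊢
  omega

theorem pvIB_eq_of_pos (n m : Int) (c c' : Int × Int) (hc : pvIB n m c) (hc' : pvIB n m c')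
    (h : c.1.toNat = c'.1.toNat ∧ c.2.toNat = c'.2.toNat) : c = c' := by
  rcases c with ⟨a1, a2⟩
  rcases c' with ⟨b1, b2⟩
  obtain ⟨h1, h2, h3, h4⟩ := hc
  obtain ⟨g1, g2, g3, g4⟩ := hc'
  simp only at h1 h2 h3 h4 g1 g2 g3 g4
  obtain ⟨e1, e2⟩ := h
  simp only [Prod.mk.injEq]
  omega

theorem pvVis_set2_iff (n m : Int) (v : List (List Bool)) (c c2 : Int × Int)
    (hc : pvIB n m c) (hc2 : pvIB n m c2) :
    (pvVis (pvSet2 v c.1 c.2 true) c2 = true ↔ (pvVis v c2 = true ∨ c2 = c)) := by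
  by_cases he : c2 = c
  · subst he
    exact iff_of_true (pvGet2_set2_self_true v c2.1 c2.2) (Or.inr rfl)
  · have hne : ¬(c.1.toNat = c2.1.toNat ∧ c.2.toNat = c2.2.toNat) := by
      intro hp
      exact he (pvIB_eq_of_pos n m c2 c hc2 hc ⟨hp.1.symm, hp.2.symm⟩)
    unfold pvVis
    rw [pvGet2_set2_ne v _ _ _ _ _ _ hne]
    simp [he]

theorem pvShape_set2 {α : Type} (n m : Int) (v : List (List α)) (i j : Int) (x : α)
    (h : pvShape n m v) : pvShape n m (pvSet2 v i j x) := by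
  obtain ⟨h1, h2⟩ := h
  by_cases hi : i.toNat < v.length
  · constructor
    · simpa [pvSet2]
    · intro r hr
      rcases List.mem_or_eq_of_mem_set hr with hr | hr
      · exact h2 r hr
      · subst hr
        rw [List.length_set, List.getD_eq_getElem _ _ hi]
        exact h2 _ (List.getElem_mem hi)
  · unfold pvSet2
    rw [List.set_eq_of_length_le (by omega)]
    exact ⟨h1, h2⟩

theorem stepB_fold_shape (grid : List String) (n m : Int) :
    ∀ (cells : List (Int × Int)) (st : List (List Bool) × List (Int × Int)),
    pvShape n m st.1 → pvShape n m (cells.foldl (stepB grid n m) st).1 := by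
  intro cells
  induction cells with
  | nil => intro st h; exact h
  | cons c t ih =>
    intro st h
    apply ih
    unfold stepB
    split_ifs with hg
    · exact pvShape_set2 n m st.1 c.1 c.2 true h
    · exact h

theorem procB_fold_shape (grid : List String) (n m : Int) :
    ∀ (l : List (Int × Int)) (st : List (List Bool) × List (Int × Int)),
    pvShape n m st.1 → pvShape n m (l.foldl (procB grid n m) st).1 := by
  intro l
  induction l with
  | nil => intro st h; exact h
  | cons c t ih =>
    intro st h
    exact ih _ (stepB_fold_shape grid n m _ st h)

theorem pvGet2_idx {α : Type} (M : List (List α)) (i j : Int) (d : α)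
    (hx : i.toNat < M.length) (hy : j.toNat < (M[i.toNat]'hx).length) :
    pvGet2 M i j d = (M[i.toNat]'hx)[j.toNat]'hy := by
  unfold pvGet2
  rw [List.getD_eq_getElem _ _ hx, List.getD_eq_getElem _ _ hy]

-- characterisation of one stepB fold (the neighbours of one frontier cell)
theorem stepB_fold_char (grid : List String) (n m : Int) :
    ∀ (cells : List (Int × Int)) (v : List (List Bool)) (acc : List (Int × Int)),
    ∃ v' new,
      cells.foldl (stepB grid n m) (v, acc) = (v', acc ++ new) ∧
      (∀ c ∈ new, c ∈ cells ∧ pvIB n m c ∧ pvLand grid c ∧ pvVis v c = false) ∧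
      (∀ c, pvIB n m c → (pvVis v' c = true ↔ (pvVis v c = true ∨ c ∈ new))) ∧
      (∀ c ∈ cells, pvIB n m c → pvLand grid c → pvVis v c = false → c ∈ new) := by
  intro cells
  induction cells with
  | nil =>
    intro v acc
    exact ⟨v, [], by simp, by simp, fun c _ => by simp, by simp⟩
  | cons c t ih =>
    intro v acc
    simp only [List.foldl_cons]
    by_cases hg : (0 ≤ c.1 ∧ c.1 < n) ∧ (0 ≤ c.2 ∧ c.2 < m) ∧
        pvGet2 v c.1 c.2 true = false ∧ pvGridChar grid c.1 c.2 = 'L'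
    · have hstep : stepB grid n m (v, acc) c = (pvSet2 v c.1 c.2 true, acc ++ [c]) := by
        unfold stepB; rw [if_pos hg]
      rw [hstep]
      obtain ⟨v', new1, heq, hprop, hvis, hcompl⟩ := ih (pvSet2 v c.1 c.2 true) (acc ++ [c])
      have hcIB : pvIB n m c := ⟨hg.1.1, hg.1.2, hg.2.1.1, hg.2.1.2⟩
      have hvisSet : ∀ c2, pvIB n m c2 →
          (pvVis (pvSet2 v c.1 c.2 true) c2 = true ↔ (pvVis v c2 = true ∨ c2 = c)) :=
        fun c2 h2 => pvVis_set2_iff n m v c c2 hcIB h2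
      refine ⟨v', c :: new1, by rw [heq]; simp, ?_, ?_, ?_⟩
      · intro c2 h2
        rcases List.mem_cons.mp h2 with he | ht
      
        · subst he
          exact ⟨List.mem_cons_self, hcIB, hg.2.2.2, hg.2.2.1⟩
        · obtain ⟨hmem, hIB2, hL2, hv2⟩ := hprop c2 ht
          have hnor : ¬(pvVis v c2 = true ∨ c2 = c) := by
            intro hor
            have h' := (hvisSet c2 hIB2).mpr hor
            rw [hv2] at h'
            exact Bool.false_ne_true h'
          refine ⟨List.mem_cons_of_mem _ hmem, hIB2, hL2, ?_⟩
          cases hvv : pvVis v c2 with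
          | true => exact absurd (Or.inl hvv) hnor
          | false => rfl
      · intro c2 h2
        rw [hvis c2 h2, hvisSet c2 h2, List.mem_cons]
        tauto
      · intro c2 hc2 hIB2 hL2 hvf
        by_cases he : c2 = c
        · subst he; exact List.mem_cons_self
        · have hmem : c2 ∈ t := by
            rcases List.mem_cons.mp hc2 with h | h
            · exact absurd h he
            · exact h
          have hvf1 : pvVis (pvSet2 v c.1 c.2 true) c2 = false := by
            cases hvv : pvVis (pvSet2 v c.1 c.2 true) c2 with
            | false => rfl
            | true =>
              rcases (hvisSet c2 hIB2).mp hvv with h | h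
              · rw [h] at hvf; exact absurd hvf (by simp)
              · exact absurd h he
          exact List.mem_cons_of_mem _ (hcompl c2 hmem hIB2 hL2 hvf1)
    · have hstep : stepB grid n m (v, acc) c = (v, acc) := by
        unfold stepB; rw [if_neg hg]
      rw [hstep]
      obtain ⟨v', new1, heq, hprop, hvis, hcompl⟩ := ih v acc
      refine ⟨v', new1, heq, ?_, hvis, ?_⟩
      · intro c2 h2
        obtain ⟨hmem, rest⟩ := hprop c2 h2
        exact ⟨List.mem_cons_of_mem _ hmem, rest⟩
      · intro c2 hc2 hIB2 hL2 hvf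
        rcases List.mem_cons.mp hc2 with he | ht
        · subst he
          exact absurd ⟨⟨hIB2.1, hIB2.2.1⟩, ⟨hIB2.2.2.1, hIB2.2.2.2⟩, hvf, hL2⟩ hg
        · exact hcompl c2 ht hIB2 hL2 hvf

-- characterisation of one whole level (fold of procB over the frontier)
theorem procB_fold_char (grid : List String) (n m : Int) :
    ∀ (l : List (Int × Int)) (v : List (List Bool)) (acc : List (Int × Int)),
    ∃ v' new,
      l.foldl (procB grid n m) (v, acc) = (v', acc ++ new) ∧
      (∀ c ∈ new, pvIB n m c ∧ pvLand grid c ∧ pvVis v c = false ∧ ∃ p ∈ l, c ∈ nbrs p.1 p.2) ∧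
      (∀ c, pvIB n m c → (pvVis v' c = true ↔ (pvVis v c = true ∨ c ∈ new))) ∧
      (∀ p ∈ l, ∀ c ∈ nbrs p.1 p.2, pvIB n m c → pvLand grid c → pvVis v c = false → c ∈ new) := by
  intro l
  induction l with
  | nil =>
    intro v acc
    exact ⟨v, [], by simp, by simp, fun c _ => by simp, by simp⟩
  | cons p t ih =>
    intro v acc
    simp only [List.foldl_cons]
    obtain ⟨v1, new1, heq1, hprop1, hvis1, hcompl1⟩ := stepB_fold_char grid n m (nbrs p.1 p.2) v acc
    have hproc : procB grid n m (v, acc) p = (v1, acc ++ new1) := heq1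
    rw [hproc]
    obtain ⟨v', new2, heq2, hprop2, hvis2, hcompl2⟩ := ih v1 (acc ++ new1)
    refine ⟨v', new1 ++ new2, by rw [heq2]; simp, ?_, ?_, ?_⟩
    · intro c hc
      rcases List.mem_append.mp hc with h | h
      · obtain ⟨hmem, hIB, hL, hv⟩ := hprop1 c h
        exact ⟨hIB, hL, hv, p, List.mem_cons_self, hmem⟩
      · obtain ⟨hIB, hL, hv1c, q, hq, hnb⟩ := hprop2 c h
        have hvv : pvVis v c = false := by
          cases hvv : pvVis v c with
          | false => rfl
          | true =>
            have := (hvis1 c hIB).mpr (Or.inl hvv)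
            rw [this] at hv1c
            exact absurd hv1c (by simp)
        exact ⟨hIB, hL, hvv, q, List.mem_cons_of_mem _ hq, hnb⟩
    · intro c hIB
      rw [hvis2 c hIB, hvis1 c hIB, List.mem_append]
      tauto
    · intro q hq c hnb hIB hL hvf
      rcases List.mem_cons.mp hq with he | ht
      · subst he
        exact List.mem_append.mpr (Or.inl (hcompl1 c hnb hIB hL hvf))
      · by_cases h1 : c ∈ new1
        · exact List.mem_append.mpr (Or.inl h1)
        · have hvf1 : pvVis v1 c = false := by
            cases hvv : pvVis v1 c with
            | false => rfl
            | true =>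
              rcases (hvis1 c hIB).mp hvv with h | h
              · rw [h] at hvf; exact absurd hvf (by simp)
              · exact absurd h h1
          exact List.mem_append.mpr (Or.inr (hcompl2 q ht c hnb hIB hL hvf1))


-- a finite cell keeps its value through one sweep (needs the Lipschitz property)
theorem relaxFold_keep (D : List (List (Option Int))) (n m k : Int) :
    ∀ l : List (Int × Int),
    (∀ c ∈ l, pvIB n m c → ∀ d, pvD D c = some d → k ≤ d + 1) →
    l.foldl (relaxStep D n m) (some k) = some k := by
  intro l
  induction l with
  | nil => intro _; rfl
  | cons c t ih =>
    intro h
    simp only [List.foldl_cons]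
    have hstep : relaxStep D n m (some k) c = some k := by
      unfold relaxStep
      split_ifs with hg
      · obtain ⟨hb1, hb2, hne⟩ := hg
        cases hd : pvGet2 D c.1 c.2 (none : Option Int) with
        | none => exact absurd hd hne
        | some dv =>
          have hk := h c List.mem_cons_self ⟨hb1.1, hb1.2, hb2.1, hb2.2⟩ dv hd
          show (if dv + 1 < k then some (dv + 1) else some k) = some k
          rw [if_neg (by omega)]
      · rfl
    rw [hstep]
    exact ih (fun c' hc' => h c' (List.mem_cons_of_mem _ hc'))

-- the fold over the neighbours of an undiscovered cell, when every finite neighbour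
-- carries value depth
theorem relaxFold_new (D : List (List (Option Int))) (n m depth : Int) :
    ∀ (l : List (Int × Int)) (b : Option Int),
    (b = none ∨ b = some (depth + 1)) →
    (∀ c ∈ l, pvIB n m c → ∀ d, pvD D c = some d → d = depth) →
    ((l.foldl (relaxStep D n m) b = some (depth + 1) ∧
        (b = some (depth + 1) ∨ ∃ c ∈ l, pvIB n m c ∧ pvD D c ≠ none)) ∨
     (l.foldl (relaxStep D n m) b = none ∧ b = none ∧
        ∀ c ∈ l, pvIB n m c → pvD D c = none)) := by
  intro l
  induction l with
  | nil =>
    intro b hb _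
    rcases hb with hb | hb
    · right; exact ⟨hb, hb, by simp⟩
    · left; exact ⟨hb, Or.inl hb⟩
  | cons c t ih =>
    intro b hb hval
    simp only [List.foldl_cons]
    by_cases hact : pvIB n m c ∧ pvD D c ≠ none
    · obtain ⟨hIB, hne⟩ := hact
      cases hd : pvD D c with
      | none => exact absurd hd hne
      | some dv =>
        have hdv : dv = depth := hval c List.mem_cons_self hIB dv hd
        have hstep : relaxStep D n m b c = some (depth + 1) := by
          unfold relaxStep
          rw [if_pos ⟨⟨hIB.1, hIB.2.1⟩, ⟨hIB.2.2.1, hIB.2.2.2⟩,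
            by rw [show pvGet2 D c.1 c.2 (none : Option Int) = some dv from hd]; simp⟩]
          rw [show pvGet2 D c.1 c.2 (none : Option Int) = some dv from hd]
          rcases hb with hb | hb
          · subst hb
            show some (dv + 1) = some (depth + 1)
            rw [hdv]
          · subst hb
            show (if dv + 1 < depth + 1 then some (dv + 1) else some (depth + 1)) = some (depth + 1)
            rw [if_neg (by omega)]
        rw [hstep]
        have := ih (some (depth + 1)) (Or.inr rfl)
          (fun c' hc' => hval c' (List.mem_cons_of_mem _ hc'))
        rcases this with ⟨h1, _⟩ | ⟨_, h2, _⟩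
        · left
          exact ⟨h1, Or.inr ⟨c, List.mem_cons_self, hIB, hne⟩⟩
        · exact absurd h2 (by simp)
    · have hstep : relaxStep D n m b c = b := by
        unfold relaxStep
        rw [if_neg ?_]
        intro hg
        exact hact ⟨⟨hg.1.1, hg.1.2, hg.2.1.1, hg.2.1.2⟩, hg.2.2⟩
      rw [hstep]
      have := ih b hb (fun c' hc' => hval c' (List.mem_cons_of_mem _ hc'))
      rcases this with ⟨h1, h2⟩ | ⟨h1, h2, h3⟩
      · left
        refine ⟨h1, ?_⟩
        rcases h2 with h | ⟨c', hc', hh⟩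
        · exact Or.inl h
        · exact Or.inr ⟨c', List.mem_cons_of_mem _ hc', hh⟩
      · right
        refine ⟨h1, h2, ?_⟩
        intro c' hc' hIB'
        rcases List.mem_cons.mp hc' with he | ht
        · subst he
          by_contra hne'
          exact hact ⟨hIB', hne'⟩
        · exact h3 c' ht hIB'

theorem cellValue_keep (D : List (List (Option Int))) (grid : List String) (n m : Int)
    (c : Int × Int) (k : Int) (hd : pvD D c = some k)
    (hlip : ∀ c' ∈ nbrs c.1 c.2, pvIB n m c' → ∀ d, pvD D c' = some d → k ≤ d + 1) :
    cellValue D grid n m c.1 c.2 = some k := by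
  unfold cellValue
  split_ifs with hL
  · exact hd
  · rw [show pvGet2 D c.1 c.2 (none : Option Int) = some k from hd]
    exact relaxFold_keep D n m k _ hlip

theorem cellValue_new (D : List (List (Option Int))) (grid : List String) (n m depth : Int)
    (c : Int × Int) (hd : pvD D c = none) (hL : pvLand grid c)
    (hval : ∀ c' ∈ nbrs c.1 c.2, pvIB n m c' → ∀ d, pvD D c' = some d → d = depth) :
    (cellValue D grid n m c.1 c.2 = some (depth + 1) ∧
       ∃ c' ∈ nbrs c.1 c.2, pvIB n m c' ∧ pvD D c' ≠ none) ∨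
    (cellValue D grid n m c.1 c.2 = none ∧
       ∀ c' ∈ nbrs c.1 c.2, pvIB n m c' → pvD D c' = none) := by
  unfold cellValue
  rw [if_neg (by simpa [pvLand] using hL)]
  rw [show pvGet2 D c.1 c.2 (none : Option Int) = none from hd]
  rcases relaxFold_new D n m depth (nbrs c.1 c.2) none (Or.inl rfl) hval with
    ⟨h1, h2⟩ | ⟨h1, _, h3⟩
  · left
    refine ⟨h1, ?_⟩
    rcases h2 with h | h
    · exact absurd h (by simp)
    · exact h
  · right
    exact ⟨h1, h3⟩

theorem cellValue_notland (D : List (List (Option Int))) (grid : List String) (n m x y : Int)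
    (hL : ¬ pvGridChar grid x y = 'L') :
    cellValue D grid n m x y = pvGet2 D x y (none : Option Int) := by
  unfold cellValue
  rw [if_pos hL]

theorem relaxGrid_shape (D : List (List (Option Int))) (grid : List String) (n m : Int) :
    pvShape n m (relaxGrid D grid n m) := by
  constructor
  · simp [relaxGrid]
  · intro r hr
    simp only [relaxGrid, List.mem_map] at hr
    obtain ⟨x, _, rfl⟩ := hr
    simp

theorem pvGetD_map_range {α : Type} (k : Nat) (f : Nat → α) (i : Nat) (d : α) (h : i < k) :
    ((List.range k).map f).getD i d = f i := by
  rw [List.getD_eq_getElem _ _ (by simpa using h)]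
  simp

theorem pvD_relaxGrid (D : List (List (Option Int))) (grid : List String) (n m : Int)
    (c : Int × Int) (h : pvIB n m c) :
    pvD (relaxGrid D grid n m) c = cellValue D grid n m c.1 c.2 := by
  obtain ⟨h1, h2, h3, h4⟩ := h
  have hx : c.1.toNat < n.toNat := by omega
  have hy : c.2.toNat < m.toNat := by omega
  unfold pvD pvGet2 relaxGrid
  rw [pvGetD_map_range _ _ _ _ hx, pvGetD_map_range _ _ _ _ hy]
  rw [Int.toNat_of_nonneg h1, Int.toNat_of_nonneg h3]

theorem pvMatEq {α : Type} (n m : Int) (M M' : List (List α)) (d : α)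
    (hs : pvShape n m M) (hs' : pvShape n m M')
    (h : ∀ c, pvIB n m c → pvGet2 M c.1 c.2 d = pvGet2 M' c.1 c.2 d) : M = M' := by
  apply List.ext_getElem (by rw [hs.1, hs'.1])
  intro x hx hx'
  apply List.ext_getElem
  · rw [hs.2 _ (List.getElem_mem hx), hs'.2 _ (List.getElem_mem hx')]
  · intro y hy hy'
    have hxn : x < n.toNat := by rw [← hs.1]; exact hx
    have hym : y < m.toNat := by
      rw [← hs.2 _ (List.getElem_mem hx)]; exact hy
    have hIB : pvIB n m ((x : Int), (y : Int)) := by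
      refine ⟨by omega, by omega, by omega, by omega⟩
    have hq := h ((x : Int), (y : Int)) hIB
    rw [pvGet2_idx M (x : Int) (y : Int) d (by simpa using hx)
        (by simpa using hy)] at hq
    rw [pvGet2_idx M' (x : Int) (y : Int) d (by simpa using hx')
        (by simpa using hy')] at hq
    simpa using hq

-- counting the undiscovered cells (termination fuel bookkeeping)
def pvNoneCount (M : List (List (Option Int))) : Nat :=
  (M.map (fun r => r.countP (fun o => o.isNone))).sum

theorem rowNone_le : ∀ (L L' : List (Option Int)) (hl : L.length = L'.length),
    (∀ i (h : i < L.length), L[i]'h ≠ none → L'[i]'(by omega) ≠ none) →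
    L'.countP (fun o => o.isNone) ≤ L.countP (fun o => o.isNone) := by
  intro L
  induction L with
  | nil =>
    intro L' hl _
    cases L' with
    | nil => exact le_refl _
    | cons b t' => simp at hl
  | cons a t ih =>
    intro L' hl h
    cases L' with
    | nil => simp at hl
    | cons b t' =>
      have hh : a ≠ none → b ≠ none := fun ha => h 0 (by simp) (by simpa)
      have ht := ih t' (by simpa using hl)
        (fun i hi hne => by
          have := h (i + 1) (by simpa using Nat.succ_lt_succ hi) (by simpa using hne)
          simpa using this)
      simp only [List.countP_cons]
      cases a with
      | none => cases b <;> simp <;> omega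
      | some av =>
        have hb := hh (by simp)
        cases b with
        | none => exact absurd rfl hb
        | some bv => simp; omega

theorem rowNone_lt : ∀ (L L' : List (Option Int)) (hl : L.length = L'.length),
    (∀ i (h : i < L.length), L[i]'h ≠ none → L'[i]'(by omega) ≠ none) →
    (∃ i, ∃ (h : i < L.length), L[i]'h = none ∧ L'[i]'(by omega) ≠ none) →
    L'.countP (fun o => o.isNone) < L.countP (fun o => o.isNone) := by
  intro L
  induction L with
  | nil =>
    intro L' _ _ hw
    obtain ⟨i, hi, _⟩ := hw
    simp at hi
  | cons a t ih =>
    intro L' hl h hw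
    cases L' with
    | nil => simp at hl
    | cons b t' =>
      have hh : a ≠ none → b ≠ none := fun ha => h 0 (by simp) (by simpa)
      have hl' : t.length = t'.length := by simpa using hl
      have htail : ∀ i (hi : i < t.length), t[i]'hi ≠ none → t'[i]'(by omega : i < t'.length) ≠ none :=
        fun i hi hne => by
          have := h (i + 1) (by simpa using Nat.succ_lt_succ hi) (by simpa using hne)
          simpa using this
      have hle := rowNone_le t t' (by simpa using hl) htail
      obtain ⟨i, hi, hLi, hLi'⟩ := hw
      simp only [List.countP_cons]
      cases i with
      | zero =>
        simp only [List.getElem_cons_zero] at hLi hLi'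
        subst hLi
        cases b with
        | none => exact absurd rfl hLi'
        | some bv => simp; omega
      | succ i' =>
        simp only [List.getElem_cons_succ] at hLi hLi'
        have hlt := ih t' (by simpa using hl) htail
          ⟨i', by simpa using Nat.lt_of_succ_lt_succ hi, hLi, hLi'⟩
        cases a with
        | none => cases b <;> simp <;> omega
        | some av =>
          have hb := hh (by simp)
          cases b with
          | none => exact absurd rfl hb
          | some bv => simp; omega

theorem sum_le_of_pointwise : ∀ (a b : List Nat) (hl : a.length = b.length),
    (∀ i (h : i < a.length), b[i]'(by omega) ≤ a[i]'h) →
    b.sum ≤ a.sum := by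
  intro a
  induction a with
  | nil =>
    intro b hl _
    cases b with
    | nil => exact le_refl _
    | cons y t' => simp at hl
  | cons x t ih =>
    intro b hl h
    cases b with
    | nil => simp at hl
    | cons y t' =>
      have hhead : y ≤ x := h 0 (by simp)
      have := ih t' (by simpa using hl)
        (fun i hi => by
          have := h (i + 1) (by simpa using Nat.succ_lt_succ hi)
          simpa using this)
      simp only [List.sum_cons]
      omega

theorem sum_lt_of_pointwise : ∀ (a b : List Nat) (hl : a.length = b.length),
    (∀ i (h : i < a.length), b[i]'(by omega) ≤ a[i]'h) →
    (∃ i, ∃ (h : i < a.length), b[i]'(by omega) < a[i]'h) →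
    b.sum < a.sum := by
  intro a
  induction a with
  | nil =>
    intro b _ _ hw
    obtain ⟨i, hi, _⟩ := hw
    simp at hi
  | cons x t ih =>
    intro b hl h hw
    cases b with
    | nil => simp at hl
    | cons y t' =>
      have hhead : y ≤ x := h 0 (by simp)
      have hl' : t.length = t'.length := by simpa using hl
      have htail : ∀ i (hi : i < t.length), t'[i]'(by omega : i < t'.length) ≤ t[i]'hi :=
        fun i hi => by
          have := h (i + 1) (by simpa using Nat.succ_lt_succ hi)
          simpa using this
      have htle : t'.sum ≤ t.sum := sum_le_of_pointwise t t' (by simpa using hl) htail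
      obtain ⟨i, hi, hlt⟩ := hw
      cases i with
      | zero =>
        simp only [List.getElem_cons_zero] at hlt
        simp only [List.sum_cons]
        omega
      | succ i' =>
        simp only [List.getElem_cons_succ] at hlt
        have := ih t' (by simpa using hl) htail
          ⟨i', by simpa using Nat.lt_of_succ_lt_succ hi, hlt⟩
        simp only [List.sum_cons]
        omega

theorem pvNoneCount_lt (n m : Int) (D D' : List (List (Option Int)))
    (hs : pvShape n m D) (hs' : pvShape n m D')
    (hkeep : ∀ c, pvIB n m c → pvD D c ≠ none → pvD D' c = pvD D c)
    (hnew : ∃ c, pvIB n m c ∧ pvD D c = none ∧ pvD D' c ≠ none) :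
    pvNoneCount D' < pvNoneCount D := by
  unfold pvNoneCount
  have hlen : D.length = D'.length := by rw [hs.1, hs'.1]
  have hcell : ∀ (x y : Nat) (hx : x < D.length) (hy : y < (D[x]'hx).length),
      ∃ (hx' : x < D'.length) (hy' : y < (D'[x]'hx').length),
        pvD D ((x : Int), (y : Int)) = (D[x]'hx)[y]'hy ∧
        pvD D' ((x : Int), (y : Int)) = (D'[x]'hx')[y]'hy' := by
    intro x y hx hy
    have hx' : x < D'.length := by omega
    have hy' : y < (D'[x]'hx').length := by
      rw [hs'.2 _ (List.getElem_mem hx')]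
      rw [hs.2 _ (List.getElem_mem hx)] at hy
      exact hy
    refine ⟨hx', hy', ?_, ?_⟩
    · unfold pvD
      rw [pvGet2_idx D (x : Int) (y : Int) none (by simpa using hx) (by simpa using hy)]
      simp
    · unfold pvD
      rw [pvGet2_idx D' (x : Int) (y : Int) none (by simpa using hx') (by simpa using hy')]
      simp
  have hIBxy : ∀ (x y : Nat) (hx : x < D.length) (hy : y < (D[x]'hx).length),
      pvIB n m ((x : Int), (y : Int)) := by
    intro x y hx hy
    have h1 : x < n.toNat := by rw [← hs.1]; exact hx
    have h2 : y < m.toNat := by rw [← hs.2 _ (List.getElem_mem hx)]; exact hy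
    exact ⟨by omega, by omega, by omega, by omega⟩
  refine sum_lt_of_pointwise _ _ (by simp [hlen]) ?_ ?_
  · intro x hxm
    have hx : x < D.length := by simpa using hxm
    have hx' : x < D'.length := by omega
    simp only [List.getElem_map]
    refine rowNone_le _ _ (by rw [hs.2 _ (List.getElem_mem hx), hs'.2 _ (List.getElem_mem hx')]) ?_
    intro y hy hne
    obtain ⟨hx'2, hy', he1, he2⟩ := hcell x y hx hy
    have := hkeep ((x : Int), (y : Int)) (hIBxy x y hx hy) (by rw [he1]; exact hne)
    rw [he1, he2] at this
    rw [this]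
    exact hne
  · obtain ⟨c, hIB, hnone, hne⟩ := hnew
    obtain ⟨hc1, hc2, hc3, hc4⟩ := hIB
    have hx : c.1.toNat < D.length := by rw [hs.1]; omega
    have hy : c.2.toNat < (D[c.1.toNat]'hx).length := by
      rw [hs.2 _ (List.getElem_mem hx)]; omega
    refine ⟨c.1.toNat, by simpa using hx, ?_⟩
    simp only [List.getElem_map]
    obtain ⟨hx', hy', he1, he2⟩ := hcell c.1.toNat c.2.toNat hx hy
    have hcast : ((c.1.toNat : Int), (c.2.toNat : Int)) = c := by
      have e1 : ((c.1.toNat : Int)) = c.1 := Int.toNat_of_nonneg hc1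
      have e2 : ((c.2.toNat : Int)) = c.2 := Int.toNat_of_nonneg hc3
      rw [e1, e2]
    rw [hcast] at he1 he2
    refine rowNone_lt _ _ (by rw [hs.2 _ (List.getElem_mem hx), hs'.2 _ (List.getElem_mem hx')]) ?_ ?_
    · intro y2 hy2 hne2
      obtain ⟨hxa, hyb, ha1, ha2⟩ := hcell c.1.toNat y2 hx hy2
      have := hkeep ((c.1.toNat : Int), (y2 : Int)) (hIBxy c.1.toNat y2 hx hy2)
        (by rw [ha1]; exact hne2)
      rw [ha1, ha2] at this
      rw [this]
      exact hne2
    · exact ⟨c.2.toNat, hy, by rw [← he1]; exact hnone, by rw [← he2]; exact hne⟩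

theorem sum_le_mul : ∀ (a : List Nat) (b : Nat), (∀ x ∈ a, x ≤ b) → a.sum ≤ a.length * b := by
  intro a
  induction a with
  | nil => intro b _; simp
  | cons x t ih =>
    intro b h
    have := ih b (fun y hy => h y (List.mem_cons_of_mem _ hy))
    have hx := h x List.mem_cons_self
    simp only [List.sum_cons, List.length_cons]
    calc x + t.sum ≤ b + t.length * b := by omega
    _ = (t.length + 1) * b := by ring

theorem pvNoneCount_le (n m : Int) (D : List (List (Option Int))) (hs : pvShape n m D) :
    pvNoneCount D ≤ n.toNat * m.toNat := by
  unfold pvNoneCount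
  have h1 : (D.map (fun r => r.countP (fun o => o.isNone))).length = n.toNat := by
    simpa using hs.1
  calc (D.map (fun r => r.countP (fun o => o.isNone))).sum
      ≤ (D.map (fun r => r.countP (fun o => o.isNone))).length * m.toNat := by
        apply sum_le_mul
        intro x hx
        simp only [List.mem_map] at hx
        obtain ⟨r, hr, rfl⟩ := hx
        calc r.countP (fun o => o.isNone) ≤ r.length := List.countP_le_length
        _ = m.toNat := hs.2 r hr
    _ = n.toNat * m.toNat := by rw [h1]

theorem foldl_max_eq (depth : Int) : ∀ (L : List Int) (v : Int),
    (∀ x ∈ L, x ≤ depth) → v ≤ depth → (v = depth ∨ depth ∈ L) →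
    L.foldl max v = depth := by
  intro L
  induction L with
  | nil =>
    intro v _ _ hd
    rcases hd with h | h
    · simpa using h
    · simp at h
  | cons a t ih =>
    intro v hub hv hd
    simp only [List.foldl_cons]
    apply ih
    · exact fun x hx => hub x (List.mem_cons_of_mem _ hx)
    · exact max_le hv (hub a List.mem_cons_self)
    · rcases hd with h | h
      · subst h
        left
        exact max_eq_left (hub a List.mem_cons_self)
      · rcases List.mem_cons.mp h with h | h
        · subst h
          left
          exact max_eq_right hv
        · right
          exact h

theorem maxFinite_eq (n m : Int) (D : List (List (Option Int))) (depth : Int)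
    (hs : pvShape n m D)
    (hub : ∀ c, pvIB n m c → ∀ k, pvD D c = some k → k ≤ depth)
    (hat : ∃ c, pvIB n m c ∧ pvD D c = some depth) :
    maxFinite D = depth := by
  have hubL : ∀ x ∈ D.flatten.filterMap id, x ≤ depth := by
    intro x hx
    rw [List.mem_filterMap] at hx
    obtain ⟨o, ho, hid⟩ := hx
    rw [List.mem_flatten] at ho
    obtain ⟨r, hr, hor⟩ := ho
    obtain ⟨xi, hxi, rfl⟩ := List.mem_iff_getElem.mp hr
    obtain ⟨yi, hyi, rfl⟩ := List.mem_iff_getElem.mp hor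
    have hIB : pvIB n m ((xi : Int), (yi : Int)) := by
      have h1 : xi < n.toNat := by rw [← hs.1]; exact hxi
      have h2 : yi < m.toNat := by rw [← hs.2 _ (List.getElem_mem hxi)]; exact hyi
      exact ⟨by omega, by omega, by omega, by omega⟩
    apply hub _ hIB x
    unfold pvD
    rw [pvGet2_idx D (xi : Int) (yi : Int) none (by simpa using hxi) (by simpa using hyi)]
    simpa using hid
  have hatL : depth ∈ D.flatten.filterMap id := by
    obtain ⟨c, hIB, hd⟩ := hat
    obtain ⟨h1, h2, h3, h4⟩ := hIB
    rw [List.mem_filterMap]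
    refine ⟨some depth, ?_, rfl⟩
    rw [List.mem_flatten]
    have hx : c.1.toNat < D.length := by rw [hs.1]; omega
    have hy : c.2.toNat < (D[c.1.toNat]'hx).length := by
      rw [hs.2 _ (List.getElem_mem hx)]; omega
    refine ⟨D[c.1.toNat]'hx, List.getElem_mem hx, ?_⟩
    have hd' : (D[c.1.toNat]'hx)[c.2.toNat]'hy = some depth := by
      rw [← pvGet2_idx D c.1 c.2 none hx hy]
      exact hd
    rw [← hd']
    exact List.getElem_mem hy
  unfold maxFinite
  cases hL : D.flatten.filterMap id with
  | nil => rw [hL] at hatL; simp at hatL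
  | cons v vs =>
    rw [hL] at hubL hatL
    apply foldl_max_eq depth vs v
    · exact fun x hx => hubL x (List.mem_cons_of_mem _ hx)
    · exact hubL v List.mem_cons_self
    · rcases List.mem_cons.mp hatL with h | h
      · exact Or.inl h.symm
      · exact Or.inr h


-- one reference-loop round versus one relaxation sweep
theorem roundSim (grid : List String) (n m : Int) (v : List (List Bool)) (f : List (Int × Int))
    (depth : Int) (D : List (List (Option Int))) (hInv : pvInv grid n m v f depth D) :
    ∃ v' new,
      f.foldl (procB grid n m) (v, ([] : List (Int × Int))) = (v', new) ∧
      (new = [] → relaxGrid D grid n m = D) ∧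
      (new ≠ [] → relaxGrid D grid n m ≠ D ∧
          pvNoneCount (relaxGrid D grid n m) < pvNoneCount D ∧
          pvInv grid n m v' new (depth + 1) (relaxGrid D grid n m)) := by
  obtain ⟨hsv, hsD, hI1, hI2, hI3, hI4, hI5, hI6⟩ := hInv
  obtain ⟨v', new, heq0, hmem, hvisIff, hcompl⟩ := procB_fold_char grid n m f v []
  rw [List.nil_append] at heq0
  have hVF : ∀ c, pvIB n m c → pvVis v c = false → pvD D c = none := by
    intro c hIB hvf
    by_contra hne
    have hx := (hI1 c hIB).mpr hne
    rw [hvf] at hx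
    exact absurd hx (by simp)
  have hFV : ∀ c, pvIB n m c → pvD D c = none → pvVis v c = false := by
    intro c hIB hn
    cases hvv : pvVis v c with
    | false => rfl
    | true => exact absurd hn ((hI1 c hIB).mp hvv)
  have key1 : ∀ c, pvIB n m c → pvD D c = none → pvLand grid c →
      ∀ c' ∈ nbrs c.1 c.2, pvIB n m c' → pvD D c' ≠ none → c' ∈ f := by
    intro c hIB hn hL c' hnb hIB' hne'
    by_contra hnf
    have hv' : pvVis v c' = true := (hI1 c' hIB').mpr hne'
    have hvc := hI6 c' hIB' hv' hnf c hIB (nbrs_symm c' c hnb) hL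
    exact ((hI1 c hIB).mp hvc) hn
  have key2 : ∀ c, (c ∈ new ↔ (pvIB n m c ∧ pvLand grid c ∧ pvD D c = none ∧
      ∃ c' ∈ nbrs c.1 c.2, pvIB n m c' ∧ pvD D c' ≠ none)) := by
    intro c
    constructor
    · intro hc
      obtain ⟨hIB, hL, hvf, p, hp, hnb⟩ := hmem c hc
      obtain ⟨hIBp, hdp⟩ := hI2 p hp
      exact ⟨hIB, hL, hVF c hIB hvf, p, nbrs_symm c p hnb, hIBp, by rw [hdp]; simp⟩
    · rintro ⟨hIB, hL, hn, c', hnb, hIB', hne'⟩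
      have hpf : c' ∈ f := key1 c hIB hn hL c' hnb hIB' hne'
      exact hcompl c' hpf c (nbrs_symm c' c hnb) hIB hL (hFV c hIB hn)
  have keyval : ∀ c, pvIB n m c → pvD D c = none → pvLand grid c →
      ∀ c' ∈ nbrs c.1 c.2, pvIB n m c' → ∀ d, pvD D c' = some d → d = depth := by
    intro c hIB hn hL c' hnb hIB' d hd
    have hin := key1 c hIB hn hL c' hnb hIB' (by rw [hd]; simp)
    have h2 := (hI2 c' hin).2
    rw [hd] at h2
    exact Option.some_inj.mp h2
  set D' := relaxGrid D grid n m with hD'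
  have hsD' : pvShape n m D' := relaxGrid_shape D grid n m
  have cellKeep : ∀ c, pvIB n m c → ∀ k, pvD D c = some k → pvD D' c = some k := by
    intro c hIB k hk
    rw [hD', pvD_relaxGrid D grid n m c hIB]
    apply cellValue_keep D grid n m c k hk
    intro c' hnb hIB' d hd
    exact hI5 c' c hIB' hIB (nbrs_symm c' c hnb) d k hd hk
  have cellNew : ∀ c ∈ new, pvD D' c = some (depth + 1) := by
    intro c hc
    obtain ⟨hIB, hL, hn, hex⟩ := (key2 c).mp hc
    rw [hD', pvD_relaxGrid D grid n m c hIB]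
    rcases cellValue_new D grid n m depth c hn hL (keyval c hIB hn hL) with ⟨h1, _⟩ | ⟨_, h3⟩
    · exact h1
    · obtain ⟨c', hnb, hIB', hne'⟩ := hex
      exact absurd (h3 c' hnb hIB') hne'
  have cellNone : ∀ c, pvIB n m c → pvD D c = none → c ∉ new → pvD D' c = none := by
    intro c hIB hn hnc
    rw [hD', pvD_relaxGrid D grid n m c hIB]
    by_cases hL : pvLand grid c
    · rcases cellValue_new D grid n m depth c hn hL (keyval c hIB hn hL) with ⟨_, hex⟩ | ⟨h3, _⟩
      · exact absurd ((key2 c).mpr ⟨hIB, hL, hn, hex⟩) hnc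
      · exact h3
    · rw [cellValue_notland D grid n m c.1 c.2 (by simpa [pvLand] using hL)]
      exact hn
  refine ⟨v', new, heq0, ?_, ?_⟩
  · intro hnil
    subst hnil
    apply pvMatEq n m D' D none hsD' hsD
    intro c hIB
    cases hk : pvD D c with
    | some k =>
      show pvD D' c = pvD D c
      rw [cellKeep c hIB k hk, hk]
    | none =>
      show pvD D' c = pvD D c
      rw [cellNone c hIB hk (by simp), hk]
  · intro hne
    obtain ⟨c0, hc0⟩ := List.exists_mem_of_ne_nil new hne
    have hc0IB := ((key2 c0).mp hc0).1
    have hc0n : pvD D c0 = none := ((key2 c0).mp hc0).2.2.1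
    have hc0' : pvD D' c0 = some (depth + 1) := cellNew c0 hc0
    refine ⟨?_, ?_, ?_⟩
    · intro hEq
      rw [hEq, hc0n] at hc0'
      exact absurd hc0' (by simp)
    · apply pvNoneCount_lt n m D D' hsD hsD'
      · intro c hIB hneD
        cases hk : pvD D c with
        | none => exact absurd hk hneD
        | some k => exact cellKeep c hIB k hk
      · exact ⟨c0, hc0IB, hc0n, by rw [hc0']; simp⟩
    · have hsv' : pvShape n m v' := by
        have hsh := procB_fold_shape grid n m f (v, ([] : List (Int × Int))) hsv
        rw [heq0] at hsh
        exact hsh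
      refine ⟨hsv', hsD', ?_, ?_, ?_, ?_, ?_, ?_⟩
      · intro c hIB
        rw [hvisIff c hIB]
        constructor
        · rintro (hv | hn2)
          · have hne2 := (hI1 c hIB).mp hv
            cases hk : pvD D c with
            | none => exact absurd hk hne2
            | some k => rw [cellKeep c hIB k hk]; simp
          · rw [cellNew c hn2]; simp
        · intro hne2
          by_cases hv : pvVis v c = true
          · exact Or.inl hv
          · by_cases hcn : c ∈ new
            · exact Or.inr hcn
            · have hvf : pvVis v c = false := by
                cases hvv : pvVis v c with
                | false => rfl
                | true => exact absurd hvv hv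
              exact absurd (cellNone c hIB (hVF c hIB hvf) hcn) hne2
      · intro c hc
        exact ⟨((key2 c).mp hc).1, cellNew c hc⟩
      · intro c hIB k hk
        cases hkD : pvD D c with
        | some k0 =>
          have he := cellKeep c hIB k0 hkD
          rw [he] at hk
          have hkk : k0 = k := Option.some_inj.mp hk
          have hb := hI3 c hIB k0 hkD
          omega
        | none =>
          by_cases hcn : c ∈ new
          · have he := cellNew c hcn
            rw [he] at hk
            have hkk : depth + 1 = k := Option.some_inj.mp hk
            omega
          · have he := cellNone c hIB hkD hcn
            rw [he] at hk
            exact absurd hk (by simp)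
      · exact ⟨c0, hc0IB, hc0'⟩
      · intro c c' hIB hIB' hnb k k' hk hk'
        have hk'le : k' ≤ depth + 1 := by
          cases hkD' : pvD D c' with
          | some k1 =>
            have he' := cellKeep c' hIB' k1 hkD'
            rw [he'] at hk'
            have hkk : k1 = k' := Option.some_inj.mp hk'
            have hb := hI3 c' hIB' k1 hkD'
            omega
          | none =>
            by_cases hcn' : c' ∈ new
            · have he' := cellNew c' hcn'
              rw [he'] at hk'
              have hkk : depth + 1 = k' := Option.some_inj.mp hk'
              omega
            · have he' := cellNone c' hIB' hkD' hcn'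
              rw [he'] at hk'
              exact absurd hk' (by simp)
        cases hkD : pvD D c with
        | some k0 =>
          have he := cellKeep c hIB k0 hkD
          rw [he] at hk
          have hkk : k0 = k := Option.some_inj.mp hk
          cases hkD' : pvD D c' with
          | some k1 =>
            have he' := cellKeep c' hIB' k1 hkD'
            rw [he'] at hk'
            have hkk' : k1 = k' := Option.some_inj.mp hk'
            have hb := hI5 c c' hIB hIB' hnb k0 k1 hkD hkD'
            omega
          | none =>
            have hcn' : c' ∈ new := by
              by_contra hno
              have he' := cellNone c' hIB' hkD' hno
              rw [he'] at hk'
              exact absurd hk' (by simp)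
            have hL' : pvLand grid c' := ((key2 c').mp hcn').2.1
            have hcf := key1 c' hIB' hkD' hL' c (nbrs_symm c' c hnb) hIB (by rw [hkD]; simp)
            have hdep := (hI2 c hcf).2
            rw [hkD] at hdep
            have hk0d : k0 = depth := Option.some_inj.mp hdep
            have he' := cellNew c' hcn'
            rw [he'] at hk'
            have hkk' : depth + 1 = k' := Option.some_inj.mp hk'
            omega
        | none =>
          have hcn : c ∈ new := by
            by_contra hno
            have he := cellNone c hIB hkD hno
            rw [he] at hk
            exact absurd hk (by simp)
          have he := cellNew c hcn
          rw [he] at hk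
          have hkk : depth + 1 = k := Option.some_inj.mp hk
          omega
      · intro c hIB hv' hcn c' hIB' hnb hL'
        have hvc : pvVis v c = true := by
          rcases (hvisIff c hIB).mp hv' with h | h
          · exact h
          · exact absurd h hcn
        rw [hvisIff c' hIB']
        by_cases hvc' : pvVis v c' = true
        · exact Or.inl hvc'
        · have hvf' : pvVis v c' = false := by
            cases hq : pvVis v c' with
            | false => rfl
            | true => exact absurd hq hvc'
          by_cases hcf : c ∈ f
          · exact Or.inr (hcompl c hcf c' hnb hIB' hL' hvf')
          · exact absurd (hI6 c hIB hvc hcf c' hIB' hnb hL') hvc'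

theorem relaxLoop_succ (grid : List String) (n m : Int) (dist : List (List (Option Int)))
    (k : Nat) :
    relaxLoop grid n m dist (k + 1) =
      (if relaxGrid dist grid n m = dist then dist
       else relaxLoop grid n m (relaxGrid dist grid n m) k) := by
  rfl

-- the reference loop computes the same number as B's sweep-to-fixpoint followed by max
theorem bridgeLoop (grid : List String) (n m : Int) :
    ∀ (fuel : Nat) (v : List (List Bool)) (f : List (Int × Int)) (depth : Int)
      (D : List (List (Option Int))),
    pvInv grid n m v f depth D → pvNoneCount D < fuel →
    bfsBLoop grid n m v f depth = maxFinite (relaxLoop grid n m D fuel) := by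
  intro fuel
  induction fuel with
  | zero =>
    intro v f depth D _ hlt
    exact absurd hlt (by omega)
  | succ k ih =>
    intro v f depth D hInv hlt
    have hmax : maxFinite D = depth :=
      maxFinite_eq n m D depth hInv.2.1 hInv.2.2.2.2.1 hInv.2.2.2.2.2.1
    obtain ⟨v', new, heq, hstable, hchange⟩ := roundSim grid n m v f depth D hInv
    cases f with
    | nil =>
      simp only [List.foldl_nil] at heq
      have hnew : new = [] := (Prod.ext_iff.mp heq).2.symm
      rw [bfsBLoop_nil, relaxLoop_succ, if_pos (hstable hnew)]
      exact hmax.symm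
    | cons c cs =>
      rw [bfsBLoop_cons, heq]
      simp only
      by_cases hnew : new = []
      · subst hnew
        rw [if_pos rfl, bfsBLoop_nil, relaxLoop_succ, if_pos (hstable rfl)]
        exact hmax.symm
      · obtain ⟨hneq, hcnt, hInv2⟩ := hchange hnew
        rw [if_neg hnew, relaxLoop_succ, if_neg hneq]
        exact ih v' new (depth + 1) (relaxGrid D grid n m) hInv2 (by omega)

-- the initial states satisfy the invariant
theorem pvGet2_repl_in {α : Type} (a b : Nat) (t d : α) (x y : Int)
    (hx : x.toNat < a) (hy : y.toNat < b) :
    pvGet2 (List.replicate a (List.replicate b t)) x y d = t := by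
  unfold pvGet2
  have hrow : (List.replicate a (List.replicate b t)).getD x.toNat [] = List.replicate b t := by
    rw [List.getD_eq_getElem _ _ (by simpa using hx)]
    exact List.getElem_replicate ..
  rw [hrow, List.getD_eq_getElem _ _ (by simpa using hy)]
  exact List.getElem_replicate ..

theorem pvShape_replicate {α : Type} (n m : Int) (x : α) :
    pvShape n m (List.replicate n.toNat (List.replicate m.toNat x)) := by
  refine ⟨by simp, ?_⟩
  intro r hr
  rw [List.eq_of_mem_replicate hr]
  simp

theorem pvInit_none (a b : Nat) (i j : Int) (w : Option Int) (x y : Int)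
    (hne : ¬(i.toNat = x.toNat ∧ j.toNat = y.toNat)) :
    pvGet2 (pvSet2 (List.replicate a (List.replicate b (none : Option Int))) i j w) x y
      (none : Option Int) = none := by
  rw [pvGet2_set2_ne _ i j x y w none hne]
  apply pvAllConst
  intro r hr q hq
  rw [List.eq_of_mem_replicate hr] at hq
  exact List.eq_of_mem_replicate hq

theorem pvInit_self (a b : Nat) (i j : Int) (w : Option Int)
    (hi : i.toNat < a) (hj : j.toNat < b) :
    pvGet2 (pvSet2 (List.replicate a (List.replicate b (none : Option Int))) i j w) i j
      (none : Option Int) = w := by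
  apply pvGet2_set2_self_in
  · simpa using hi
  · have hrow : (List.replicate a (List.replicate b (none : Option Int))).getD i.toNat []
        = List.replicate b (none : Option Int) := by
      rw [List.getD_eq_getElem _ _ (by simpa using hi)]
      exact List.getElem_replicate ..
    rw [hrow]
    simpa using hj

theorem pvVisInit_other (a b : Nat) (i j x y : Int) (hx : x.toNat < a) (hy : y.toNat < b)
    (hne : ¬(i.toNat = x.toNat ∧ j.toNat = y.toNat)) :
    pvGet2 (pvSet2 (List.replicate a (List.replicate b false)) i j true) x y true = false := by
  rw [pvGet2_set2_ne _ i j x y true true hne]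
  exact pvGet2_repl_in a b false true x y hx hy

theorem initInv (grid : List String) (n m i j : Int) (hIB : pvIB n m (i, j)) :
    pvInv grid n m (pvSet2 (List.replicate n.toNat (List.replicate m.toNat false)) i j true)
      [(i, j)] 0
      (pvSet2 (List.replicate n.toNat (List.replicate m.toNat (none : Option Int))) i j
        (some 0)) := by
  obtain ⟨h1, h2, h3, h4⟩ := hIB
  have hi : i.toNat < n.toNat := by omega
  have hj : j.toNat < m.toNat := by omega
  have hposne : ∀ c : Int × Int, pvIB n m c → c ≠ (i, j) →
      ¬(i.toNat = c.1.toNat ∧ j.toNat = c.2.toNat) := by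
    intro c hc he hp
    exact he (pvIB_eq_of_pos n m c (i, j) hc ⟨h1, h2, h3, h4⟩ ⟨hp.1.symm, hp.2.symm⟩)
  have hvisc : ∀ c, pvIB n m c →
      (pvVis (pvSet2 (List.replicate n.toNat (List.replicate m.toNat false)) i j true) c = true
        ↔ c = (i, j)) := by
    intro c hc
    by_cases he : c = (i, j)
    · rw [he]
      exact iff_of_true (pvGet2_set2_self_true _ i j) rfl
    · obtain ⟨g1, g2, g3, g4⟩ := hc
      unfold pvVis
      rw [pvVisInit_other n.toNat m.toNat i j c.1 c.2 (by omega) (by omega)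
        (hposne c ⟨g1, g2, g3, g4⟩ he)]
      simp [he]
  have hDc : ∀ c, pvIB n m c →
      pvD (pvSet2 (List.replicate n.toNat (List.replicate m.toNat (none : Option Int))) i j
        (some 0)) c = (if c = (i, j) then some 0 else none) := by
    intro c hc
    by_cases he : c = (i, j)
    · rw [he, if_pos rfl]
      exact pvInit_self n.toNat m.toNat i j (some 0) hi hj
    · rw [if_neg he]
      exact pvInit_none n.toNat m.toNat i j (some 0) c.1 c.2 (hposne c hc he)
  refine ⟨?_, ?_, ?_, ?_, ?_, ?_, ?_, ?_⟩
  · exact pvShape_set2 n m _ i j true (pvShape_replicate n m false)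
  · exact pvShape_set2 n m _ i j (some 0) (pvShape_replicate n m (none : Option Int))
  · intro c hc
    rw [hvisc c hc, hDc c hc]
    by_cases he : c = (i, j) <;> simp [he]
  · intro c hcmem
    rw [List.mem_singleton] at hcmem
    subst hcmem
    exact ⟨⟨h1, h2, h3, h4⟩, by rw [hDc _ ⟨h1, h2, h3, h4⟩, if_pos rfl]⟩
  · intro c hc k hk
    rw [hDc c hc] at hk
    by_cases he : c = (i, j)
    · rw [if_pos he] at hk
      have : (0 : Int) = k := Option.some_inj.mp hk
      omega
    · rw [if_neg he] at hk
      exact absurd hk (by simp)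
  · exact ⟨(i, j), ⟨h1, h2, h3, h4⟩, by rw [hDc _ ⟨h1, h2, h3, h4⟩, if_pos rfl]⟩
  · intro c c' hc hc' hnb k k' hk hk'
    rw [hDc c hc] at hk
    rw [hDc c' hc'] at hk'
    by_cases he : c = (i, j)
    · by_cases he' : c' = (i, j)
      · exact absurd (by rw [he, he'] : c = c') (fun hcc => nbrs_ne c' c hnb (by rw [he', he]))
      · rw [if_neg he'] at hk'
        exact absurd hk' (by simp)
    · rw [if_neg he] at hk
      exact absurd hk (by simp)
  · intro c hc hvc hcf c' hc' hnb hL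
    exfalso
    apply hcf
    rw [List.mem_singleton]
    exact (hvisc c hc).mp hvc

theorem refEcc_eq_ecc (i j : Int) (grid : List String) (n m : Int) (hIB : pvIB n m (i, j)) :
    refEcc i j grid n m = eccentricity i j grid n m := by
  unfold refEcc eccentricity
  simp only
  apply bridgeLoop grid n m (n.toNat * m.toNat + 1) _ _ _ _ (initInv grid n m i j hIB)
  have hsh : pvShape n m (pvSet2 (List.replicate n.toNat
      (List.replicate m.toNat (none : Option Int))) i j (some 0)) :=
    pvShape_set2 n m _ i j (some 0) (pvShape_replicate n m (none : Option Int))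
  have := pvNoneCount_le n m _ hsh
  omega

theorem pvFoldl_congr {α β : Type} (f g : β → α → β) :
    ∀ (l : List α) (b : β), (∀ b' a, a ∈ l → f b' a = g b' a) →
    l.foldl f b = l.foldl g b := by
  intro l
  induction l with
  | nil => intro b _; rfl
  | cons a t ih =>
    intro b h
    simp only [List.foldl_cons]
    rw [h b a List.mem_cons_self]
    exact ih _ (fun b' a' ha' => h b' a' (List.mem_cons_of_mem _ ha'))

theorem solveEq (grid : List String) (n m : Int) : solve grid n m = solve_alt grid n m := by
  unfold solve solve_alt
  apply pvFoldl_congr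
  intro acc i hi
  apply pvFoldl_congr
  intro acc2 j hj
  rw [List.mem_range] at hi hj
  by_cases hL : pvGridChar grid (i : Int) (j : Int) = 'L'
  · rw [if_pos hL, if_pos hL, BFS_eq_ref, refEcc_eq_ecc]
    exact ⟨by omega, by omega, by omega, by omega⟩
  · rw [if_neg hL, if_neg hL]

-- ===== VERDICT (by name: the statement is the Claim_ definition above) =====
theorem solve_spec : Claim_equal_solve := by
  intro grid n m _hd _hp
  unfold Spec_solve
  exact solveEq grid n m
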